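-- pv_equiv track=rewrite | github.com/scipion-chem/scipion-chem | pwchem/utils/utils.py | organizeThreads
-- ===== SOURCE A (Python) =====
-- def organizeThreads(nTasks, nThreads):
--   if nTasks > nThreads:
--     return [1] * nTasks
--   else:
--     subsets = [0 for _ in range(nTasks)]
--     for i in range(nThreads):
--       subsets[i % nTasks] += 1
--   return subsets
-- ===== SOURCE B (Python) =====
-- def organizeThreads(nTasks, nThreads):
--   if nTasks > nThreads:
--     return [1] * nTasks
--   base, extra = divmod(nThreads, nTasks)
--   return [base + 1] * extra + [base] * (nTasks - extra)
-- ===== Notes on version B (the rewrite author's own statement) =====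
-- stated objective: alternative
-- what changed: Replaced the round-robin loop over all nThreads (incrementing subsets[i % nTasks] nThreads times) by a closed-form divmod split: the first nThreads % nTasks tasks get nThreads//nTasks + 1 threads, the rest get nThreads//nTasks.
-- outside the precondition, e.g. on organizeThreads(0, 0): A returns [], B raises ZeroDivisionError
import Mathlib
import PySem

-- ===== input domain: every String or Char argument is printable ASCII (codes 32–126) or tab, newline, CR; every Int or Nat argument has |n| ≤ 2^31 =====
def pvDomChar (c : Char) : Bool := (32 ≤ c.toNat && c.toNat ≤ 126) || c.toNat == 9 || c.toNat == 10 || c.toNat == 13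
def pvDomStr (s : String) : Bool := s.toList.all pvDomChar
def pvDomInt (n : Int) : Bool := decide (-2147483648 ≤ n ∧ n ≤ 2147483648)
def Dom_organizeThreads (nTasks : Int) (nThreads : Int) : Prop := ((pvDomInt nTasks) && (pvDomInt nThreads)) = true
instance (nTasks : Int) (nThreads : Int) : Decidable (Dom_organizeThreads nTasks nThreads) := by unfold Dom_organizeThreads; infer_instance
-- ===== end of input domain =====

-- B replaces A's round-robin increment loop over range(nThreads) by a closed-form divmod split; objective: alternative algorithm.


-- ===== PORT A =====
def organizeThreads (nTasks : Int) (nThreads : Int) : List Int :=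
  if nTasks > nThreads then
    List.replicate nTasks.toNat 1
  else
    let subsets := (PySem.List.pyRange 0 nTasks 1).map (fun _ => (0 : Int))
    (PySem.List.pyRange 0 nThreads 1).foldl
      (fun s i => s.modify (PySem.Int.mod i nTasks).toNat (· + 1)) subsets

-- ===== PORT B =====
def organizeThreads_alt (nTasks : Int) (nThreads : Int) : List Int :=
  if nTasks > nThreads then
    List.replicate nTasks.toNat 1
  else
    match PySem.Int.divmod? nThreads nTasks with
    | none => []   -- Python's divmod raises here (nTasks = 0); outside Pre_
    | some (base, extra) =>
        List.replicate extra.toNat (base + 1) ++ List.replicate (nTasks - extra).toNat base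

-- ===== PRECONDITION & SPEC =====
-- Pre_ excludes the inputs with nTasks ≤ 0 < nThreads, on which A raises (ZeroDivisionError for
-- nTasks = 0, IndexError for nTasks < 0 in the round-robin loop), and the single point (0, 0),
-- where A's empty loop happens to return [] while B's divmod naturally raises ZeroDivisionError.
def Pre_organizeThreads (nTasks : Int) (nThreads : Int) : Prop :=
  ¬ ((nTasks = 0 ∧ nThreads = 0) ∨ (nTasks ≤ 0 ∧ 0 < nThreads))
instance (nTasks : Int) (nThreads : Int) : Decidable (Pre_organizeThreads nTasks nThreads) := by
  unfold Pre_organizeThreads; infer_instance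

def pvWitness_organizeThreads : Int × Int := (3, 7)

def Spec_organizeThreads (nTasks : Int) (nThreads : Int) (out : List Int) : Prop := out = organizeThreads_alt nTasks nThreads
instance (nTasks : Int) (nThreads : Int) (out : List Int) : Decidable (Spec_organizeThreads nTasks nThreads out) := by unfold Spec_organizeThreads; infer_instance

-- ===== CLAIM (what is proved, stated in full; the proofs are below) =====
def Claim_equal_organizeThreads : Prop := ∀ (nTasks : Int) (nThreads : Int), Dom_organizeThreads nTasks nThreads → Pre_organizeThreads nTasks nThreads → Spec_organizeThreads nTasks nThreads (organizeThreads nTasks nThreads)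

-- ===== LEMMAS AND PROOFS =====

theorem pv_modify_append (l2 : List Int) (f : Int → Int) :
    ∀ (l1 : List Int) (k : Nat), k = l1.length → (l1 ++ l2).modify k f = l1 ++ l2.modify 0 f := by
  intro l1; induction l1 with
  | nil => intro k hk; subst hk; simp
  | cons x t ih => intro k hk; subst hk; simpa [List.modify] using ih t.length rfl

theorem pv_modify_zero (x : Int) (l : List Int) (f : Int → Int) :
    (x :: l).modify 0 f = f x :: l := by
  simp [List.modify]

theorem pv_fold_closed (n : Nat) (hn : 0 < n) : ∀ m : Nat,
    (List.range m).foldl (fun (s : List Int) (i : Nat) => s.modify (i % n) (· + 1))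
      (List.replicate n (0 : Int))
    = List.replicate (m % n) (((m / n : Nat) : Int) + 1)
        ++ List.replicate (n - m % n) ((m / n : Nat) : Int) := by
  intro m; induction m with
  | zero => simp
  | succ m ih =>
    rw [List.range_succ, List.foldl_append, ih]
    simp only [List.foldl]
    have hr : m % n < n := Nat.mod_lt _ hn
    have hsplit : n - m % n = (n - m % n - 1) + 1 := by omega
    rw [hsplit, List.replicate_succ]
    rw [pv_modify_append _ _ _ _ (by simp), pv_modify_zero]
    by_cases h : m % n + 1 = n
    · have hm1 : m + 1 = n * (m / n + 1) := by
        rw [Nat.mul_succ]; have := Nat.div_add_mod m n; omega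
      rw [hm1, Nat.mul_mod_right, Nat.mul_div_cancel_left _ hn]
      have h0 : n - m % n - 1 = 0 := by omega
      rw [h0]
      simp only [List.replicate_zero, List.nil_append, Nat.sub_zero, Nat.cast_add, Nat.cast_one]
      rw [← List.replicate_succ', h]
    · have hm1 : m + 1 = n * (m / n) + (m % n + 1) := by have := Nat.div_add_mod m n; omega
      have hlt : m % n + 1 < n := by omega
      have hd : (m + 1) / n = m / n := by
        rw [hm1, Nat.mul_add_div hn, Nat.div_eq_of_lt hlt]; omega
      have hmm : (m + 1) % n = m % n + 1 := by
        rw [hm1, Nat.mul_add_mod, Nat.mod_eq_of_lt hlt]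
      rw [hd, hmm, List.replicate_succ']
      simp only [List.append_assoc, List.singleton_append]
      congr 2

theorem pv_main (nTasks nThreads : Int)
    (hpre : ¬ ((nTasks = 0 ∧ nThreads = 0) ∨ (nTasks ≤ 0 ∧ 0 < nThreads))) :
    organizeThreads nTasks nThreads = organizeThreads_alt nTasks nThreads := by
  revert hpre
  revert nTasks nThreads
  intro n m hpre
  by_cases hgt : n > m
  · simp [organizeThreads, organizeThreads_alt, hgt]
  · have hle : n ≤ m := by omega
    rcases (show 0 < n ∨ (n < 0 ∧ m ≤ 0) by omega) with hpos | ⟨hneg, hm⟩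
    · -- positive case
      have hn0 : n ≠ 0 := by omega
      obtain ⟨N, rfl⟩ : ∃ N : Nat, n = (N : Int) := ⟨n.toNat, by omega⟩
      obtain ⟨M, rfl⟩ : ∃ M : Nat, m = (M : Int) := ⟨m.toNat, by omega⟩
      have hN : 0 < N := by exact_mod_cast hpos
      simp only [organizeThreads, organizeThreads_alt, if_neg hgt,
        PySem.List.pyRange_zero_nat, PySem.Int.divmod?, if_neg hn0]
      rw [List.foldl_map]
      rw [List.map_map]
      simp only [Function.comp_def]
      rw [List.map_const', List.length_range]
      have hfun : (fun (s : List Int) (k : Nat) => s.modify (PySem.Int.mod ↑k ↑N).toNat (· + 1))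
          = (fun (s : List Int) (k : Nat) => s.modify (k % N) (· + 1)) := by
        funext s k
        rw [PySem.Int.mod_natCast, Int.toNat_natCast]
      rw [hfun, pv_fold_closed N hN M]
      have hfd : Int.fdiv ↑M ↑N = ((M / N : Nat) : Int) := by
        have := PySem.Int.floordiv_natCast M N
        simpa [PySem.Int.floordiv] using this
      have hfm : Int.fmod ↑M ↑N = ((M % N : Nat) : Int) := by
        have := PySem.Int.mod_natCast M N
        simpa [PySem.Int.mod] using this
      rw [hfd, hfm, Int.toNat_natCast]
      have hsub : ((N : Int) - ((M % N : Nat) : Int)).toNat = N - M % N := by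
        have : M % N < N := Nat.mod_lt _ hN
        omega
      rw [hsub]
    · -- negative tasks, nonpositive threads
      have hn0 : n ≠ 0 := by omega
      obtain ⟨h1, h2⟩ := PySem.Int.mod_neg_bounds m hneg
      simp only [organizeThreads, organizeThreads_alt, if_neg hgt,
        PySem.List.pyRange_one_eq_nil hm, PySem.List.pyRange_one_eq_nil (le_of_lt hneg),
        PySem.Int.divmod?, if_neg hn0]
      have e1 : (Int.fmod m n).toNat = 0 := by
        have : Int.fmod m n ≤ 0 := by simpa [PySem.Int.mod] using h2
        omega
      have e2 : (n - Int.fmod m n).toNat = 0 := by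
        have : n < Int.fmod m n := by simpa [PySem.Int.mod] using h1
        omega
      simp [e1, e2]

-- ===== VERDICT (by name: the statement is the Claim_ definition above) =====
theorem organizeThreads_spec : Claim_equal_organizeThreads := by
  intro nTasks nThreads _ hpre
  unfold Spec_organizeThreads
  exact pv_main nTasks nThreads hpre
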